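-- pv_equiv track=rewrite | github.com/benwing2/RuNounChanges | lalib.py | split_tags_into_tag_sets
-- ===== SOURCE A (Python) =====
-- semicolon_tags = [';', ';<!--\n-->']
--
-- def split_tags_into_tag_sets(tags):
--   tag_set_group = []
--   cur_tag_set = []
--   for tag in tags:
--     if tag in semicolon_tags:
--       if cur_tag_set:
--         tag_set_group.append(cur_tag_set)
--       cur_tag_set = []
--     else:
--       cur_tag_set.append(tag)
--   if cur_tag_set:
--     tag_set_group.append(cur_tag_set)
--   return tag_set_group
-- ===== SOURCE B (Python) =====
-- semicolon_tags = [';', ';<!--\n-->']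
--
-- def split_tags_into_tag_sets(tags):
--   # run-scanning: skip separators, then take each maximal run of non-separator
--   # tags as one group via an index scan (no accumulator / flush guards needed)
--   res = []
--   i = 0
--   n = len(tags)
--   while i < n:
--     if tags[i] in semicolon_tags:
--       i += 1
--     else:
--       j = i
--       while j < n and tags[j] not in semicolon_tags:
--         j += 1
--       res.append(tags[i:j])
--       i = j
--   return res
-- ===== Notes on version B (the rewrite author's own statement) =====
-- stated objective: alternative
-- what changed: Replaces A's accumulator-with-flush-guards loop by a run-scanning two-pointer sweep: skip separators, then slice out each maximal non-separator run as a whole group.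
import Mathlib
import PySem

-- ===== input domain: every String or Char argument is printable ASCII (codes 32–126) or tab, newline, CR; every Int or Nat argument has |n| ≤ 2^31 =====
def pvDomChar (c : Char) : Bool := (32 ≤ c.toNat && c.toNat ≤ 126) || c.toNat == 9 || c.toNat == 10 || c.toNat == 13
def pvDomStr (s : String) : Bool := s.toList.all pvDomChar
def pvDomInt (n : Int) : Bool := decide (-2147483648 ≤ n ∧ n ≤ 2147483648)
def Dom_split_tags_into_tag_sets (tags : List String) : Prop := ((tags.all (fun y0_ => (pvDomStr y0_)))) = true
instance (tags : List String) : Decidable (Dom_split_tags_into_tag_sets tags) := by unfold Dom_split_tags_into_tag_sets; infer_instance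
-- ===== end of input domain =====

-- B replaces A's accumulator-with-flush loop by a run-scanning sweep (alternative decomposition, same cost).

-- ===== PORT A =====
def pvSemicolonTags : List String := [";", ";<!--\n-->"]

-- A: fold over the tags keeping (groups so far, current group), flushing on separators,
-- with a final flush of a non-empty pending group.
def split_tags_into_tag_sets (tags : List String) : List (List String) :=
  let r := tags.foldl
    (fun (st : List (List String) × List String) tag =>
      if tag ∈ pvSemicolonTags then
        (if st.2 ≠ [] then st.1 ++ [st.2] else st.1, [])
      else
        (st.1, st.2 ++ [tag]))
    ([], [])
  if r.2 ≠ [] then r.1 ++ [r.2] else r.1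

-- ===== PORT B =====
-- B's inner while loop: take the maximal leading run of non-separator tags, return (run, rest).
def pvRun : List String → List String × List String
  | [] => ([], [])
  | t :: ts =>
    if t ∈ pvSemicolonTags then ([], t :: ts)
    else
      let p := pvRun ts
      (t :: p.1, p.2)

theorem pvRun_snd_len : ∀ (l : List String), (pvRun l).2.length ≤ l.length := by
  intro l
  induction l with
  | nil => simp [pvRun]
  | cons t ts ih =>
    simp only [pvRun]
    split
    · simp
    · simpa using Nat.le_succ_of_le ih

-- B: skip separators; at a non-separator, emit the maximal run and continue after it.
def split_tags_into_tag_sets_alt : List String → List (List String)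
  | [] => []
  | t :: ts =>
    if t ∈ pvSemicolonTags then split_tags_into_tag_sets_alt ts
    else
      let p := pvRun ts
      (t :: p.1) :: split_tags_into_tag_sets_alt p.2
termination_by l => l.length
decreasing_by
  · simp
  · exact Nat.lt_succ_of_le (pvRun_snd_len ts)

-- ===== PRECONDITION & SPEC =====
def Spec_split_tags_into_tag_sets (tags : List String) (out : List (List String)) : Prop := out = split_tags_into_tag_sets_alt tags
instance (tags : List String) (out : List (List String)) : Decidable (Spec_split_tags_into_tag_sets tags out) := by unfold Spec_split_tags_into_tag_sets; infer_instance

-- ===== CLAIM (what is proved, stated in full; the proofs are below) =====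
def Claim_equal_split_tags_into_tag_sets : Prop := ∀ (tags : List String), Dom_split_tags_into_tag_sets tags → Spec_split_tags_into_tag_sets tags (split_tags_into_tag_sets tags)

-- ===== LEMMAS AND PROOFS =====

-- A's loop written as plain recursion on (remaining tags, pending group), accumulator factored out.
def pvAltC (cur : List String) : List String → List (List String)
  | [] => if cur ≠ [] then [cur] else []
  | t :: ts =>
    if t ∈ pvSemicolonTags then (if cur ≠ [] then [cur] else []) ++ pvAltC [] ts
    else pvAltC (cur ++ [t]) ts

theorem pvFoldl_eq_altC : ∀ (l : List String) (acc : List (List String)) (cur : List String),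
    (let r := l.foldl
        (fun (st : List (List String) × List String) tag =>
          if tag ∈ pvSemicolonTags then
            (if st.2 ≠ [] then st.1 ++ [st.2] else st.1, [])
          else
            (st.1, st.2 ++ [tag]))
        (acc, cur)
     if r.2 ≠ [] then r.1 ++ [r.2] else r.1) = acc ++ pvAltC cur l := by
  intro l
  induction l with
  | nil =>
    intro acc cur
    by_cases hc : cur = [] <;> simp [pvAltC, hc]
  | cons t ts ih =>
    intro acc cur
    by_cases h : t ∈ pvSemicolonTags
    · by_cases hc : cur = []
      · simpa [pvAltC, h, hc] using ih acc []
      · simpa [pvAltC, h, hc] using ih (acc ++ [cur]) []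
    · simpa [pvAltC, h] using ih acc (cur ++ [t])

theorem pvAltC_spec : ∀ (l : List String),
    pvAltC [] l = split_tags_into_tag_sets_alt l ∧
    ∀ cur : List String, cur ≠ [] →
      pvAltC cur l = (cur ++ (pvRun l).1) :: split_tags_into_tag_sets_alt (pvRun l).2 := by
  intro l
  induction l with
  | nil =>
    constructor
    · simp [pvAltC, split_tags_into_tag_sets_alt]
    · intro cur hcur
      simp [pvAltC, pvRun, split_tags_into_tag_sets_alt, hcur]
  | cons t ts ih =>
    by_cases h : t ∈ pvSemicolonTags
    · constructor
      · simp [pvAltC, h, split_tags_into_tag_sets_alt, ih.1]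
      · intro cur hcur
        simp [pvAltC, h, pvRun, split_tags_into_tag_sets_alt, hcur, ih.1]
    · constructor
      · have := ih.2 [t] (by simp)
        simp only [pvAltC, h, if_false, List.nil_append] at this ⊢
        rw [this]
        simp [split_tags_into_tag_sets_alt, h]
      · intro cur hcur
        have := ih.2 (cur ++ [t]) (by simp)
        simp only [pvAltC, h, if_false] at this ⊢
        rw [this]
        simp [pvRun, h]

-- ===== VERDICT (by name: the statement is the Claim_ definition above) =====
theorem split_tags_into_tag_sets_spec : Claim_equal_split_tags_into_tag_sets := by
  intro tags _
  unfold Spec_split_tags_into_tag_sets split_tags_into_tag_sets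
  rw [pvFoldl_eq_altC tags [] []]
  simpa using (pvAltC_spec tags).1
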